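-- pv_equiv track=rewrite | github.com/tdda/tdda | tdda/rexpy/rexpy.py | right_parts
-- ===== SOURCE A (Python) =====
-- from collections import Counter, defaultdict, namedtuple, OrderedDict
--
-- def right_parts(patterns, fixed):
--     """
--     patterns is a list of patterns each consisting of a list of frags.
--
--     fixed is a list of ``(fragment, pos)`` pairs where position specifies
--     the position from the right, i.e a position that can be indexed as
--     ``-position``.
--
--     Fixed should be sorted, increasing on position, i.e.
--     sorted from the right-most pattern.
--     The positions specify points at which to split the patterns.
--
--     This function returns a list of lists of pattern fragments,
--     split at each fixed position.
--     """
--     if not fixed: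
--         return [patterns]
--     out = []
--     lstats = length_stats(patterns)
--     lastPos = -lstats.max_length  # will be reversed in use
--     for (frag, pos) in fixed:
--         if pos > 1:  # Nothing the right if it's position -1
--             out.append([p[-pos + 1:-lastPos] for p in patterns])
--         out.append([[p[-pos]] for p in patterns])  # the fixed bit
--         lastPos = pos
--     if lastPos < lstats.max_length:  # the start, if there's anything left
--         out.append([p[:-lastPos] for p in patterns])
--     out.reverse()  # We built it up from the right; so we must reverse it
--     return out
--
-- def length_stats(patterns):
--     """
--     Given a list of patterns, returns named tuple containing
--
--         ``all_same_length``: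
--             boolean, True if all patterns are the same length
--         ``max_length``:
--             length of the longest pattern in patterns
--     """
--     lengths = [len(p) for p in patterns]
--     L0 = lengths[0] if lengths else 0
--     LS = namedtuple('lengthstats', 'all_same_length max_length')
--     return LS(all(L == L0 for L in lengths), max(lengths) if lengths else 0)
-- ===== SOURCE B (Python) =====
-- def right_parts(patterns, fixed):
--     if not fixed:
--         return [patterns]
--     max_length = max((len(p) for p in patterns), default=0)
--     rows = [pattern_row(p, fixed, max_length) for p in patterns]
--     return [[row[s] for row in rows] for s in range(num_segments(fixed, max_length))]
--
--
-- def num_segments(fixed, max_length):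
--     """How many segments the split yields, from the positions alone."""
--     n = 1 if fixed[-1][1] < max_length else 0
--     return n + sum(2 if pos > 1 else 1 for _, pos in fixed)
--
--
-- def pattern_row(p, fixed, max_length):
--     """All segment pieces of one pattern, already in output (left-to-right) order."""
--     row = [p[:-fixed[-1][1]]] if fixed[-1][1] < max_length else []
--     prevs = [-max_length] + [pos for _, pos in fixed[:-1]]
--     for (frag, pos), prev in reversed(list(zip(fixed, prevs))):
--         row.append([p[-pos]])
--         if pos > 1:
--             row.append(p[-pos + 1:-prev])
--     return row
-- ===== Notes on version B (the rewrite author's own statement) =====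
-- stated objective: alternative
-- what changed: B transposes the traversal: it computes each pattern's full row of segment pieces independently, already in final left-to-right order (previous positions paired up by a zip instead of a mutable lastPos) and with the segment count obtained by a closed-form sum, then transposes the rows; A accumulates segment-major, right-to-left, onto one mutable list and reverses it at the end.
import Mathlib
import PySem

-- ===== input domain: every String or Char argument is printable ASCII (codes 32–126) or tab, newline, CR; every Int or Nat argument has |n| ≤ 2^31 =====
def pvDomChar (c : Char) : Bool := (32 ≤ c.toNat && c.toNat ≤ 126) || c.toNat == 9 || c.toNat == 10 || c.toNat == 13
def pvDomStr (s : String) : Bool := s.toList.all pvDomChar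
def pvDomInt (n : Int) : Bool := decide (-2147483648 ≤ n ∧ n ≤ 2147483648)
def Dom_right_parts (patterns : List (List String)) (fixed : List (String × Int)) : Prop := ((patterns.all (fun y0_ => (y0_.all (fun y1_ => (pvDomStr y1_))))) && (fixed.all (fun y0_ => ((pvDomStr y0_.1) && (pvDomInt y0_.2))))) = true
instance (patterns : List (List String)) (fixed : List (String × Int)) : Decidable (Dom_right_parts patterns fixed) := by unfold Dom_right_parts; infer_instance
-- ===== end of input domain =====

-- B transposes the traversal: it computes each pattern's full row of segment pieces
-- independently, already in final left-to-right order, with the segment count in closed form,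
-- then transposes the rows; A accumulates segment-major, right-to-left, onto one mutable list
-- and reverses it at the end (objective: alternative decomposition, same cost).

-- ===== PORT A =====
def pyLengthStats (patterns : List (List String)) : Bool × Int :=
  let lengths := patterns.map fun p => (p.length : Int)
  let L0 := lengths.headD 0
  (lengths.all fun L => L == L0, (PySem.List.max? lengths (fun x => x)).getD 0)

-- loop body of A's 'for (frag, pos) in fixed', state = (out, lastPos)
def pyRightStep (patterns : List (List String)) (st : List (List (List String)) × Int)
    (fp : String × Int) : List (List (List String)) × Int :=
  let pos := fp.2
  let out1 := if pos > 1 then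
      st.1 ++ [patterns.map fun p => PySem.List.slice p (some (-pos + 1)) (some (-st.2))]
    else st.1
  -- p[-pos] raises IndexError when out of range; Pre_ excludes those inputs, '.getD ""' is never reached
  (out1 ++ [patterns.map fun p => [(PySem.List.pyGet? p (-pos)).getD ""]], pos)

def right_parts (patterns : List (List String)) (fixed : List (String × Int)) : List (List (List String)) :=
  if fixed.isEmpty then [patterns] else
    let lstats := pyLengthStats patterns
    let st := fixed.foldl (pyRightStep patterns) ([], -lstats.2)
    let out := if st.2 < lstats.2 then
        st.1 ++ [patterns.map fun p => PySem.List.slice p none (some (-st.2))]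
      else st.1
    out.reverse

-- ===== PORT B =====
def numSegments (fixed : List (String × Int)) (maxLen : Int) : Int :=
  (if ((PySem.List.pyGet? fixed (-1)).getD ("", 0)).2 < maxLen then 1 else 0) +
    (fixed.map (fun fp => if fp.2 > 1 then (2 : Int) else 1)).sum

-- fixed[-1]: the caller guarantees fixed nonempty, so '.getD ("", 0)' is never reached;
-- p[-pos] raises IndexError when out of range; Pre_ excludes those inputs, '.getD ""' is never reached
def patternRow (p : List String) (fixed : List (String × Int)) (maxLen : Int) : List (List String) :=
  let last := ((PySem.List.pyGet? fixed (-1)).getD ("", 0)).2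
  let row := if last < maxLen then [PySem.List.slice p none (some (-last))] else []
  let prevs := -maxLen :: (PySem.List.slice fixed none (some (-1))).map Prod.snd
  (fixed.zip prevs).reverse.foldl
    (fun row fp => (row ++ [[(PySem.List.pyGet? p (-fp.1.2)).getD ""]]) ++
      (if fp.1.2 > 1 then [PySem.List.slice p (some (-fp.1.2 + 1)) (some (-fp.2))] else []))
    row

-- row[s]: every row has length num_segments, so '.getD []' is never reached
def right_parts_alt (patterns : List (List String)) (fixed : List (String × Int)) : List (List (List String)) :=
  if fixed.isEmpty then [patterns] else
    let maxLen := (PySem.List.max? (patterns.map fun p => (p.length : Int)) (fun x => x)).getD 0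
    let rows := patterns.map (fun p => patternRow p fixed maxLen)
    (PySem.List.pyRange 0 (numSegments fixed maxLen) 1).map
      (fun s => rows.map (fun row => (PySem.List.pyGet? row s).getD []))

-- ===== PRECONDITION & SPEC =====
-- Pre_ excludes exactly the inputs on which A raises IndexError at p[-pos]:
-- every fixed position must be a valid negative index into every pattern.
def Pre_right_parts (patterns : List (List String)) (fixed : List (String × Int)) : Prop :=
  ∀ fp ∈ fixed, ∀ p ∈ patterns, -(p.length : Int) < fp.2 ∧ fp.2 ≤ (p.length : Int)
instance (patterns : List (List String)) (fixed : List (String × Int)) : Decidable (Pre_right_parts patterns fixed) := by unfold Pre_right_parts; infer_instance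

def pvWitness_right_parts : List (List String) × (List (String × Int)) :=
  ([["a", "b"], ["c", "b"]], [("b", 1)])

def Spec_right_parts (patterns : List (List String)) (fixed : List (String × Int)) (out : List (List (List String))) : Prop := out = right_parts_alt patterns fixed
instance (patterns : List (List String)) (fixed : List (String × Int)) (out : List (List (List String))) : Decidable (Spec_right_parts patterns fixed out) := by unfold Spec_right_parts; infer_instance

-- ===== CLAIM (what is proved, stated in full; the proofs are below) =====
def Claim_equal_right_parts : Prop := ∀ (patterns : List (List String)) (fixed : List (String × Int)), Dom_right_parts patterns fixed → Pre_right_parts patterns fixed → Spec_right_parts patterns fixed (right_parts patterns fixed)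

-- ===== LEMMAS AND PROOFS =====

-- ---- A-side normal form ----

-- the block A emits (right-to-left) for one position pos, given the previous lastPos l
def pvBlock (patterns : List (List String)) (pos l : Int) : List (List (List String)) :=
  (if pos > 1 then [patterns.map fun p => PySem.List.slice p (some (-pos + 1)) (some (-l))] else []) ++
  [patterns.map fun p => [(PySem.List.pyGet? p (-pos)).getD ""]]

def pvBlocks (patterns : List (List String)) (l : Int) : List Int → List (List (List String))
  | [] => []
  | pos :: rest => pvBlock patterns pos l ++ pvBlocks patterns pos rest

def pvLast (l : Int) : List Int → Int
  | [] => l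
  | pos :: rest => pvLast pos rest

theorem foldl_pyRightStep (patterns : List (List String)) (fixed : List (String × Int))
    (out₀ : List (List (List String))) (l : Int) :
    fixed.foldl (pyRightStep patterns) (out₀, l)
      = (out₀ ++ pvBlocks patterns l (fixed.map Prod.snd), pvLast l (fixed.map Prod.snd)) := by
  induction fixed generalizing out₀ l with
  | nil => simp [pvBlocks, pvLast]
  | cons fp rest ih =>
    simp only [List.foldl_cons, List.map_cons, pvBlocks, pvLast]
    rw [show pyRightStep patterns (out₀, l) fp = (out₀ ++ pvBlock patterns fp.2 l, fp.2) by
      simp only [pyRightStep, pvBlock]; split_ifs <;> simp]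
    rw [ih]; simp

-- ---- the common descriptor list: one piece-building function per output segment ----

def pvFixF (pos : Int) : List String → List String :=
  fun p => [(PySem.List.pyGet? p (-pos)).getD ""]

def pvMidF (pos l : Int) : List String → List String :=
  fun p => PySem.List.slice p (some (-pos + 1)) (some (-l))

def pvHeadF (last : Int) : List String → List String :=
  fun p => PySem.List.slice p none (some (-last))

-- descriptors in A's right-to-left block order
def pvDBlocks (l : Int) : List Int → List (List String → List String)
  | [] => []
  | pos :: rest => ((if pos > 1 then [pvMidF pos l] else []) ++ [pvFixF pos]) ++ pvDBlocks pos rest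

-- descriptors in final (left-to-right) output order
def pvDescs (l : Int) (positions : List Int) (maxLen : Int) : List (List String → List String) :=
  (if pvLast l positions < maxLen then [pvHeadF (pvLast l positions)] else [])
    ++ (pvDBlocks l positions).reverse

theorem pvBlocks_eq_map (patterns : List (List String)) (l : Int) (ps : List Int) :
    pvBlocks patterns l ps = (pvDBlocks l ps).map (fun f => patterns.map f) := by
  induction ps generalizing l with
  | nil => simp [pvBlocks, pvDBlocks]
  | cons pos rest ih =>
    simp only [pvBlocks, pvDBlocks, pvBlock, List.map_append, ih]
    congr 1
    by_cases h1 : pos > 1 <;> simp [h1, pvMidF, pvFixF]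

-- A's output is the descriptor list applied segment-major
theorem right_parts_eq_descs (patterns : List (List String)) (fixed : List (String × Int))
    (h : ¬fixed.isEmpty) :
    right_parts patterns fixed
      = (pvDescs (-(pyLengthStats patterns).2) (fixed.map Prod.snd)
            (pyLengthStats patterns).2).map (fun f => patterns.map f) := by
  unfold right_parts
  simp only [h, Bool.false_eq_true, if_false]
  rw [foldl_pyRightStep patterns fixed [] (-(pyLengthStats patterns).2)]
  unfold pvDescs
  rw [List.map_append, List.map_reverse, ← pvBlocks_eq_map]
  split_ifs with hc
  · rw [List.nil_append, List.reverse_append]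
    simp [pvHeadF]
  · simp

-- ---- B-side: each pattern's row is the descriptor list applied to that pattern ----

theorem pvLast_eq_pyGetLast (fixed : List (String × Int)) (l : Int) (h : fixed ≠ []) :
    ((PySem.List.pyGet? fixed (-1)).getD ("", 0)).2 = pvLast l (fixed.map Prod.snd) := by
  rw [PySem.List.pyGet?_neg_one]
  induction fixed generalizing l with
  | nil => exact absurd rfl h
  | cons fp rest ih =>
    cases rest with
    | nil => simp [pvLast]
    | cons q r =>
      rw [List.getLast?_cons_cons]
      exact ih fp.2 (by simp)

theorem foldl_row_step (p : List String) (fs : List (String × Int)) (l : Int)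
    (init : List (List String)) :
    ((fs.zip (l :: fs.dropLast.map Prod.snd)).reverse.foldl
        (fun row fp => (row ++ [[(PySem.List.pyGet? p (-fp.1.2)).getD ""]]) ++
          (if fp.1.2 > 1 then [PySem.List.slice p (some (-fp.1.2 + 1)) (some (-fp.2))] else []))
        init)
      = init ++ ((pvDBlocks l (fs.map Prod.snd)).map (fun f => f p)).reverse := by
  induction fs generalizing l init with
  | nil => simp [pvDBlocks]
  | cons fp rest ih =>
    cases rest with
    | nil =>
      simp only [List.dropLast, List.map_nil, List.zip_cons_cons, List.zip_nil_left,
        List.reverse_cons, List.reverse_nil, List.nil_append, List.foldl_cons, List.foldl_nil,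
        List.map_cons, pvDBlocks]
      by_cases h1 : fp.2 > 1 <;> simp [h1, pvMidF, pvFixF]
    | cons q r =>
      have hdl : (fp :: q :: r).dropLast = fp :: (q :: r).dropLast := rfl
      rw [hdl, List.map_cons, List.zip_cons_cons, List.reverse_cons, List.foldl_append,
        ih fp.2 init]
      simp only [List.foldl_cons, List.foldl_nil, List.map_cons]
      rw [show pvDBlocks l (fp.2 :: q.2 :: r.map Prod.snd)
            = ((if fp.2 > 1 then [pvMidF fp.2 l] else []) ++ [pvFixF fp.2])
              ++ pvDBlocks fp.2 (q.2 :: r.map Prod.snd) from rfl]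
      rw [List.map_append, List.reverse_append]
      by_cases h1 : fp.2 > 1 <;> simp [h1, pvMidF, pvFixF]

theorem patternRow_eq_descs (p : List String) (fixed : List (String × Int)) (maxLen : Int)
    (h : fixed ≠ []) :
    patternRow p fixed maxLen
      = (pvDescs (-maxLen) (fixed.map Prod.snd) maxLen).map (fun f => f p) := by
  unfold patternRow pvDescs
  rw [PySem.List.slice_to_neg_one, foldl_row_step p fixed (-maxLen),
    pvLast_eq_pyGetLast fixed (-maxLen) h, List.map_append, List.map_reverse]
  split_ifs with hc <;> simp [pvHeadF]

-- ---- the closed-form segment count is the descriptor count ----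

theorem numSegments_eq_length (fixed : List (String × Int)) (maxLen : Int) (h : fixed ≠ []) :
    numSegments fixed maxLen
      = ((pvDescs (-maxLen) (fixed.map Prod.snd) maxLen).length : Int) := by
  unfold numSegments pvDescs
  rw [pvLast_eq_pyGetLast fixed (-maxLen) h]
  have hsum : ∀ (l : Int) (fs : List (String × Int)),
      (fs.map (fun fp => if fp.2 > 1 then (2 : Int) else 1)).sum
        = ((pvDBlocks l (fs.map Prod.snd)).length : Int) := by
    intro l fs
    induction fs generalizing l with
    | nil => simp [pvDBlocks]
    | cons fp rest ih =>
      simp only [List.map_cons, List.sum_cons, pvDBlocks, List.length_append, ih fp.2]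
      by_cases h1 : fp.2 > 1 <;> simp [h1]
  have hs := hsum (-maxLen) fixed
  rw [List.length_append, List.length_reverse]
  split_ifs with hc <;>
    simp only [List.length_cons, List.length_nil] <;> push_cast <;> linarith [hs]

-- ---- transposing the rows yields the segment-major output ----

theorem map_range_getD {α β : Type} (l : List α) (g : α → β) (d : α) :
    (List.range l.length).map (fun b => g (l.getD b d)) = l.map g := by
  apply List.ext_getElem
  · simp
  · intro i h1 h2
    simp [List.getD_eq_getElem?_getD, List.getElem?_eq_getElem (by simpa using h1 : i < l.length)]

theorem alt_eq_descs (patterns : List (List String)) (fixed : List (String × Int))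
    (h : ¬fixed.isEmpty) :
    right_parts_alt patterns fixed
      = (pvDescs (-((PySem.List.max? (patterns.map fun p => (p.length : Int)) (fun x => x)).getD 0))
            (fixed.map Prod.snd)
            ((PySem.List.max? (patterns.map fun p => (p.length : Int)) (fun x => x)).getD 0)).map
          (fun f => patterns.map f) := by
  have hne : fixed ≠ [] := by simpa [List.isEmpty_iff] using h
  unfold right_parts_alt
  simp only [h, Bool.false_eq_true, if_false]
  set maxLen := (PySem.List.max? (patterns.map fun p => (p.length : Int)) (fun x => x)).getD 0
    with hml
  set descs := pvDescs (-maxLen) (fixed.map Prod.snd) maxLen with hd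
  rw [numSegments_eq_length fixed maxLen hne, ← hd]
  rw [PySem.List.pyRange_zero_natCast]
  rw [List.map_map]
  calc (List.range descs.length).map
        (fun s => (patterns.map fun p => patternRow p fixed maxLen).map
          fun row => (PySem.List.pyGet? row ((s : Nat) : Int)).getD [])
      = (List.range descs.length).map
        (fun s => (fun f => patterns.map f) (descs.getD s (fun _ => []))) := by
        apply List.map_congr_left
        intro s hs
        have hs' : s < descs.length := by simpa using hs
        rw [List.map_map]
        apply List.map_congr_left
        intro p _
        simp only [Function.comp]
        rw [patternRow_eq_descs p fixed maxLen hne, ← hd, PySem.List.pyGet?_natCast,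
          List.getElem?_map, List.getElem?_eq_getElem hs']
        simp [List.getD_eq_getElem?_getD, List.getElem?_eq_getElem hs']
    _ = descs.map (fun f => patterns.map f) :=
        map_range_getD descs (fun f => patterns.map f) (fun _ => [])

theorem right_parts_eq_alt (patterns : List (List String)) (fixed : List (String × Int)) :
    right_parts patterns fixed = right_parts_alt patterns fixed := by
  by_cases h : fixed.isEmpty
  · unfold right_parts right_parts_alt
    rw [if_pos h, if_pos h]
  · rw [right_parts_eq_descs patterns fixed h, alt_eq_descs patterns fixed h]
    rfl

-- ===== VERDICT (by name: the statement is the Claim_ definition above) =====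
theorem right_parts_spec : Claim_equal_right_parts := by
  intro patterns fixed _ _
  unfold Spec_right_parts
  exact right_parts_eq_alt patterns fixed
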